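-- pv_equiv track=rewrite | github.com/Valhstack/Advent-of-Code-2025 | Day 10/solution.py | build_button_masks
-- ===== SOURCE A (Python) =====
-- def build_button_masks(mask_length, button_index_lists):
--     """
--     Converts each list of indices like [0,3,4] into a 0/1 mask vector.
--     """
--     masks = []
--     for index_list in button_index_lists:
--         mask = [0] * mask_length
--         for idx in index_list:
--             if 0 <= idx < mask_length:
--                 mask[idx] = 1
--         masks.append(mask)
--     return masks
-- ===== SOURCE B (Python) =====
-- def build_button_masks(mask_length, button_index_lists):
--     return [
--         [1 if i in idx_set else 0 for i in range(mask_length)]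
--         for idx_set in (set(index_list) for index_list in button_index_lists)
--     ]
-- ===== Notes on version B (the rewrite author's own statement) =====
-- stated objective: idiomatic
-- what changed: B iterates over every mask position and tests membership in a set of the indices (comprehension), instead of writing 1s into a pre-zeroed vector at each listed index; the range guard becomes implicit.
import Mathlib
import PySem

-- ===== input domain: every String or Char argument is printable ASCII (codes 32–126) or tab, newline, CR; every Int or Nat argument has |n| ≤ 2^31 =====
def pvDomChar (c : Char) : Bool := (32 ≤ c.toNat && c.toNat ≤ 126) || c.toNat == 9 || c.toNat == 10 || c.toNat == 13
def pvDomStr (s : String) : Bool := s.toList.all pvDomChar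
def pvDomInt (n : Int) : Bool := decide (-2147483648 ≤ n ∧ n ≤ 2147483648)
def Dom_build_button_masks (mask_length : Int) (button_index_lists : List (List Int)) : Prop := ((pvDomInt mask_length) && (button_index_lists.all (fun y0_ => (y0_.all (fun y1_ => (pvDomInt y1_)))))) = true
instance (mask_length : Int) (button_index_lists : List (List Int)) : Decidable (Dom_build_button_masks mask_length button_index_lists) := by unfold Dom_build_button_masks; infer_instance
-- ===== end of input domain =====

-- B builds each mask by iterating over the positions and testing set membership, instead of writing into a pre-zeroed vector (more idiomatic; same cost).


-- ===== PORT A =====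
def build_button_masks (mask_length : Int) (button_index_lists : List (List Int)) : List (List Int) :=
  button_index_lists.foldl (fun masks index_list =>
    masks ++ [index_list.foldl (fun mask idx =>
      if 0 ≤ idx ∧ idx < mask_length then PySem.List.pySetD mask idx 1 else mask)
      (List.replicate mask_length.toNat (0 : Int))]) []

-- ===== PORT B =====
def build_button_masks_alt (mask_length : Int) (button_index_lists : List (List Int)) : List (List Int) :=
  button_index_lists.map (fun index_list =>
    let s : PySem.Set Int := PySem.Set.ofList index_list
    (PySem.List.pyRange 0 mask_length 1).map (fun i => if PySem.Set.contains s i then (1 : Int) else 0))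

-- ===== PRECONDITION & SPEC =====
def Spec_build_button_masks (mask_length : Int) (button_index_lists : List (List Int)) (out : List (List Int)) : Prop := out = build_button_masks_alt mask_length button_index_lists
instance (mask_length : Int) (button_index_lists : List (List Int)) (out : List (List Int)) : Decidable (Spec_build_button_masks mask_length button_index_lists out) := by unfold Spec_build_button_masks; infer_instance

-- ===== CLAIM (what is proved, stated in full; the proofs are below) =====
def Claim_equal_build_button_masks : Prop := ∀ (mask_length : Int) (button_index_lists : List (List Int)), Dom_build_button_masks mask_length button_index_lists → Spec_build_button_masks mask_length button_index_lists (build_button_masks mask_length button_index_lists)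

-- ===== LEMMAS AND PROOFS =====

-- A's inner loop preserves the mask length.
theorem pv_foldl_set_length (n : Int) (l : List Int) (m : List Int) :
    (l.foldl (fun mask idx => if 0 ≤ idx ∧ idx < n then PySem.List.pySetD mask idx 1 else mask) m).length
      = m.length := by
  induction l generalizing m with
  | nil => rfl
  | cons idx l ih =>
      simp only [List.foldl_cons]
      rw [ih]
      split_ifs with h
      · exact PySem.List.length_pySetD _ _ _
      · rfl

-- Pointwise value of A's inner loop: position j ends as 1 iff j occurs in the index list.
theorem pv_foldl_set_get (n : Int) (l : List Int) : ∀ (m : List Int) (j : Nat),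
    j < m.length → ((j : Int) < n) →
    (l.foldl (fun mask idx => if 0 ≤ idx ∧ idx < n then PySem.List.pySetD mask idx 1 else mask) m)[j]?
      = some (if (j : Int) ∈ l then (1 : Int) else m[j]!) := by
  induction l with
  | nil =>
      intro m j hj hn
      simp [List.getElem?_eq_getElem hj, List.getElem!_eq_getElem?_getD,
            List.getElem?_eq_getElem hj]
  | cons idx l ih =>
      intro m j hj hn
      simp only [List.foldl_cons]
      by_cases hr : 0 ≤ idx ∧ idx < n
      · rw [if_pos hr, PySem.List.pySetD_of_nonneg _ _ hr.1]
        have hlen : j < (m.set idx.toNat 1).length := by simpa using hj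
        rw [ih (m.set idx.toNat 1) j hlen hn]
        by_cases hmem : (j : Int) ∈ l
        · simp [hmem]
        · by_cases hje : (j : Int) = idx
          · have : idx.toNat = j := by omega
            simp [hmem, hje, List.getElem!_eq_getElem?_getD, this,
                  List.getElem?_set_self (by simpa using hj)]
          · have : idx.toNat ≠ j := by omega
            simp [hmem, hje, List.getElem!_eq_getElem?_getD,
                  List.getElem?_set_ne this]
      · rw [if_neg hr]
        rw [ih m j hj hn]
        have hje : (j : Int) ≠ idx := by omega
        simp [hje]

-- The masks built by the two programs agree for each index list.
theorem pv_inner_eq (n : Int) (l : List Int) :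
    (l.foldl (fun mask idx => if 0 ≤ idx ∧ idx < n then PySem.List.pySetD mask idx 1 else mask)
      (List.replicate n.toNat (0 : Int)))
      = (PySem.List.pyRange 0 n 1).map
          (fun i => if PySem.Set.contains (PySem.Set.ofList l) i then (1 : Int) else 0) := by
  apply List.ext_getElem?
  intro j
  have hlenA : (l.foldl (fun mask idx => if 0 ≤ idx ∧ idx < n then PySem.List.pySetD mask idx 1 else mask)
      (List.replicate n.toNat (0 : Int))).length = n.toNat := by
    rw [pv_foldl_set_length n l]; simp
  have hlenB : ((PySem.List.pyRange 0 n 1).map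
      (fun i => if PySem.Set.contains (PySem.Set.ofList l) i then (1 : Int) else 0)).length = n.toNat := by
    simp [PySem.List.length_pyRange_one]
  by_cases hj : j < n.toNat
  · have hn : (j : Int) < n := by omega
    have hm : j < (List.replicate n.toNat (0 : Int)).length := by simpa using hj
    rw [pv_foldl_set_get n l (List.replicate n.toNat (0 : Int)) j hm hn]
    have hB : j < ((PySem.List.pyRange 0 n 1).map
        (fun i => if PySem.Set.contains (PySem.Set.ofList l) i then (1 : Int) else 0)).length := by
      rw [hlenB]; exact hj
    rw [List.getElem?_eq_getElem hB]
    simp only [List.getElem_map, PySem.List.getElem_pyRange_one]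
    have hrep : (List.replicate n.toNat (0 : Int))[j]! = 0 := by
      simp [List.getElem!_eq_getElem?_getD, List.getElem?_eq_getElem hm]
    rw [hrep]
    by_cases hmem : (j : Int) ∈ l <;>
      simp [hmem, PySem.Set.contains_eq_listContains, PySem.Set.mem_ofList]
  · have h1 : (l.foldl (fun mask idx => if 0 ≤ idx ∧ idx < n then PySem.List.pySetD mask idx 1 else mask)
        (List.replicate n.toNat (0 : Int))).length ≤ j := by rw [hlenA]; omega
    have h2 : ((PySem.List.pyRange 0 n 1).map
        (fun i => if PySem.Set.contains (PySem.Set.ofList l) i then (1 : Int) else 0)).length ≤ j := by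
      rw [hlenB]; omega
    rw [List.getElem?_eq_none_iff.mpr h1, List.getElem?_eq_none_iff.mpr h2]

-- ===== VERDICT (by name: the statement is the Claim_ definition above) =====
theorem build_button_masks_spec : Claim_equal_build_button_masks := by
  intro n ls hd
  clear hd
  unfold Spec_build_button_masks build_button_masks build_button_masks_alt
  induction ls using List.reverseRecOn with
  | nil => rfl
  | append_singleton ls l ih =>
      simp only [List.foldl_append, List.foldl_cons, List.foldl_nil, List.map_append,
        List.map_cons, List.map_nil]
      rw [ih]
      simp [pv_inner_eq]
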